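-- pv_equiv track=rewrite | github.com/Atravieso23/INFORMATICA | Final Julio 2022/Ejercicio 2 Practico.py | fun2t1
-- ===== SOURCE A (Python) =====
-- def cargar(lst):
--     for i in range(len(lst)):
--         lst[i]=(lst[i][:-1]).split(',')
--     return lst
--
-- def ordenar (lst):
--     for j in range (0,len(lst)-1):
--         for m in range(j+1,(len(lst))):
--             if lst[j][1] < lst[m][1]:
--                 aux=lst[m]
--                 lst[m]=lst[j]
--                 lst[j]=aux
--     return lst
--
-- def fun2t1(n):
--     lstArch= ["club, jugador, partidos, minutos, goles, tiros, anio\n", "(JUV), Cristiano Ronaldo, 29, 2634, 25, 162, 2016\n", "(PSG), Neymar, 30, 2694, 13, 105, 2016\n", "(BAR), Lionel Messi, 32, 2910, 37, 179, 2016\n", "(RMA), Eden Hazard, 36, 3101, 16, 77, 2016\n", "(TOT), Dele Alli, 35, 3182, 18, 95, 2016\n", "(BAR), Lionel Messi, 32, 3123, 33, 197, 2017\n", "(JUV), Cristiano Ronaldo, 27, 2375, 26, 178, 2017\n", "(BAR), Lionel Messi, 29, 2849, 36, 170, 2018\n", "(JUV), Cristiano Ronaldo, 30, 2857, 21, 177,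 2018\n", "(PSG), Angel Di Maria, 28, 2418, 12, 97, 2018\n", "(PSG), Neymar, 16, 1517, 15, 54, 2018\n", "(MNU), Edinson Cavani, 20, 1845, 11, 54, 2018\n", "(RMA), Eden Hazard, 32, 3115, 16, 93, 2018\n", "(BAR), Lionel Messi, 32, 3067, 25, 159, 2019\n", "(JUV), Cristiano Ronaldo, 33, 3127, 31, 208, 2019\n", "(INT), Lautaro Martinez, 29, 2581, 14, 82, 2019\n", "(PSG), Neymar, 15, 1396, 12, 71, 2019\n", "(PSG), Angel Di Maria, 23, 2106, 8, 74, 2019\n", "(BAR), Lionel Messi, 6, 501, 10, 39, 2020\n", "(JUV), Cristiano Ronaldo, 5, 397, 8, 26, 2020\n"]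
--     lst=cargar(lstArch)
--     lstfinal=[]
--     for i in range (1,len(lst)):
--         jugador=lst[i][1]
--         cantmin=0
--         for j in range (1,len(lst)):
--             minutos=int(lst[j][3])
--             if lst[j][1]==jugador:
--                 cantmin+=minutos
--         if [jugador,cantmin] not in lstfinal:
--                 lstfinal.append([jugador,cantmin])
--     ordenar(lstfinal)
--     return lstfinal[:n]
-- ===== SOURCE B (Python) =====
-- DATA = ["club, jugador, partidos, minutos, goles, tiros, anio\n", "(JUV), Cristiano Ronaldo, 29, 2634, 25, 162, 2016\n", "(PSG), Neymar, 30, 2694, 13, 105, 2016\n", "(BAR), Lionel Messi, 32, 2910, 37, 179, 2016\n", "(RMA), Eden Hazard, 36, 3101, 16, 77, 2016\n", "(TOT), Dele Alli, 35, 3182, 18, 95, 2016\n", "(BAR), Lionel Messi, 32, 3123, 33, 197, 2017\n", "(JUV), Cristiano Ronaldo, 27, 2375, 26, 178, 2017\n", "(BAR), Lionel Messi, 29, 2849, 36, 170, 2018\n", "(JUV), Cristiano Ronaldo, 30, 2857, 21, 177, 2018\n", "(PSG), Angel Di Maria, 28, 2418, 12, 97, 2018\n", "(PSG), Neymar, 16,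 1517, 15, 54, 2018\n", "(MNU), Edinson Cavani, 20, 1845, 11, 54, 2018\n", "(RMA), Eden Hazard, 32, 3115, 16, 93, 2018\n", "(BAR), Lionel Messi, 32, 3067, 25, 159, 2019\n", "(JUV), Cristiano Ronaldo, 33, 3127, 31, 208, 2019\n", "(INT), Lautaro Martinez, 29, 2581, 14, 82, 2019\n", "(PSG), Neymar, 15, 1396, 12, 71, 2019\n", "(PSG), Angel Di Maria, 23, 2106, 8, 74, 2019\n", "(BAR), Lionel Messi, 6, 501, 10, 39, 2020\n", "(JUV), Cristiano Ronaldo, 5, 397, 8, 26, 2020\n"]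
--
-- def fun2t1(n):
--     rows = [line[:-1].split(',') for line in DATA[1:]]
--     totals = {}
--     for fields in rows:
--         totals[fields[1]] = totals.get(fields[1], 0) + int(fields[3])
--     pairs = sorted(([name, mins] for name, mins in totals.items()),
--                    key=lambda p: p[1], reverse=True)
--     return pairs[:n]
-- ===== Notes on version B (the rewrite author's own statement) =====
-- stated objective: simpler
-- what changed: Replaces A's per-row O(m^2) re-scan of all rows for each row's player plus membership-dedup and a hand-written descending swap sort by one pass over the data rows accumulating totals in a dict keyed by the parsed player name, then a library sort by total descending (no ties: all totals are distinct) and a slice.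
import Mathlib
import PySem

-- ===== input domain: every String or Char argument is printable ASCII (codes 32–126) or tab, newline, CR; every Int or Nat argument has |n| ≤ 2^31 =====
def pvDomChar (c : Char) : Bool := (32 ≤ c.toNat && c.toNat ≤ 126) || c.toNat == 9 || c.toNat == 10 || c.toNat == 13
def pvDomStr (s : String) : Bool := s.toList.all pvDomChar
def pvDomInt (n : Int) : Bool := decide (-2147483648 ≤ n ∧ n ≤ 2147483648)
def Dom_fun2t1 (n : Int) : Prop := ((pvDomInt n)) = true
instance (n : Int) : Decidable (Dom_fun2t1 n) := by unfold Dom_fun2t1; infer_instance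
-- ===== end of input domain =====

-- B replaces A's O(m²) per-row re-scan + dedup and its hand-written selection sort by a
-- single-pass dict aggregation and a library sort (objective: simpler; same cost on this fixed data).

-- ===== PORT A =====
def pvLstArchA : List String := ["club, jugador, partidos, minutos, goles, tiros, anio\n", "(JUV), Cristiano Ronaldo, 29, 2634, 25, 162, 2016\n", "(PSG), Neymar, 30, 2694, 13, 105, 2016\n", "(BAR), Lionel Messi, 32, 2910, 37, 179, 2016\n", "(RMA), Eden Hazard, 36, 3101, 16, 77, 2016\n", "(TOT), Dele Alli, 35, 3182, 18, 95, 2016\n", "(BAR), Lionel Messi, 32, 3123, 33, 197, 2017\n", "(JUV), Cristiano Ronaldo, 27, 2375, 26, 178, 2017\n", "(BAR), Lionel Messi, 29, 2849, 36, 170, 2018\n", "(JUV), Cristiano Ronaldo, 30, 2857, 21, 177, 2018\n", "(PSG), Angel Di Maria, 28, 2418, 12, 97, 2018\n", "(PSG), Neymar, 16, 1517, 15, 54, 2018\n", "(MNU), Edinson Cavani, 20, 1845, 11, 54, 2018\n", "(RMA), Eden Hazard, 32, 3115, 16, 93, 2018\n", "(BAR), Lionel Messi, 32, 3067, 25, 159,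 2019\n", "(JUV), Cristiano Ronaldo, 33, 3127, 31, 208, 2019\n", "(INT), Lautaro Martinez, 29, 2581, 14, 82, 2019\n", "(PSG), Neymar, 15, 1396, 12, 71, 2019\n", "(PSG), Angel Di Maria, 23, 2106, 8, 74, 2019\n", "(BAR), Lionel Messi, 6, 501, 10, 39, 2020\n", "(JUV), Cristiano Ronaldo, 5, 397, 8, 26, 2020\n"]

-- cargar: lst[i] = (lst[i][:-1]).split(',') for each i
def pvCargar (lst : List String) : List (List String) :=
  lst.map (fun s => (PySem.Str.split? (PySem.Str.slice s none (some (-1))) ",").getD [])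

-- ordenar: the hand-written descending swap sort, index loops transcribed as folds over the same index ranges
def pvOrdenar (lst : List (String × Int)) : List (String × Int) :=
  (List.range (lst.length - 1)).foldl (fun l j =>
    (List.range' (j + 1) (lst.length - (j + 1))).foldl (fun l2 m =>
      if (l2.getD j ("", 0)).2 < (l2.getD m ("", 0)).2 then
        let aux := l2.getD m ("", 0)
        (l2.set m (l2.getD j ("", 0))).set j aux
      else l2) l) lst

-- A's lstfinal before the final slice (the body of fun2t1 up to 'ordenar(lstfinal)')
def pvLstFinalA : List (String × Int) :=
  let lst := pvCargar pvLstArchA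
  (PySem.List.pyRange 1 (PySem.List.len lst) 1).foldl (fun acc i =>
    let jugador := PySem.List.pyGetD (PySem.List.pyGetD lst i []) 1 ""
    let cantmin := (PySem.List.pyRange 1 (PySem.List.len lst) 1).foldl (fun c j =>
      let minutos := (PySem.Int.ofStr? (PySem.List.pyGetD (PySem.List.pyGetD lst j []) 3 "")).getD 0
      if PySem.List.pyGetD (PySem.List.pyGetD lst j []) 1 "" == jugador then c + minutos else c) 0
    if acc.contains (jugador, cantmin) then acc else acc ++ [(jugador, cantmin)]) []

def fun2t1 (n : Int) : List (String × Int) :=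
  PySem.List.slice (pvOrdenar pvLstFinalA) none (some n)

-- ===== PORT B =====
def pvDATA : List String := ["club, jugador, partidos, minutos, goles, tiros, anio\n", "(JUV), Cristiano Ronaldo, 29, 2634, 25, 162, 2016\n", "(PSG), Neymar, 30, 2694, 13, 105, 2016\n", "(BAR), Lionel Messi, 32, 2910, 37, 179, 2016\n", "(RMA), Eden Hazard, 36, 3101, 16, 77, 2016\n", "(TOT), Dele Alli, 35, 3182, 18, 95, 2016\n", "(BAR), Lionel Messi, 32, 3123, 33, 197, 2017\n", "(JUV), Cristiano Ronaldo, 27, 2375, 26, 178, 2017\n", "(BAR), Lionel Messi, 29, 2849, 36, 170, 2018\n", "(JUV), Cristiano Ronaldo, 30, 2857, 21, 177, 2018\n", "(PSG), Angel Di Maria, 28, 2418, 12, 97, 2018\n", "(PSG), Neymar, 16, 1517, 15, 54, 2018\n", "(MNU), Edinson Cavani, 20, 1845, 11, 54, 2018\n", "(RMA), Eden Hazard, 32, 3115, 16, 93, 2018\n", "(BAR), Lionel Messi, 32, 3067, 25, 159, 2019\n", "(JUV), Cristiano Ronaldo, 33, 3127, 31, 208, 2019\n", "(INT), Lautaro Martinez,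 29, 2581, 14, 82, 2019\n", "(PSG), Neymar, 15, 1396, 12, 71, 2019\n", "(PSG), Angel Di Maria, 23, 2106, 8, 74, 2019\n", "(BAR), Lionel Messi, 6, 501, 10, 39, 2020\n", "(JUV), Cristiano Ronaldo, 5, 397, 8, 26, 2020\n"]

-- B's rows/aggregation/sort pipeline, before the final slice
def pvRowsB : List (List String) :=
  (PySem.List.slice pvDATA (some 1) none).map
    (fun line => (PySem.Str.split? (PySem.Str.slice line none (some (-1))) ",").getD [])

def pvTotalsB (rows : List (List String)) : PySem.Dict String Int :=
  rows.foldl (fun d fields =>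
    let name := PySem.List.pyGetD fields 1 ""
    d.insert name (d.getD name 0 + (PySem.Int.ofStr? (PySem.List.pyGetD fields 3 "")).getD 0))
    PySem.Dict.empty

def pvPairsB : List (String × Int) :=
  PySem.List.sorted (pvTotalsB pvRowsB).items (fun p => p.2) true

def fun2t1_alt (n : Int) : List (String × Int) :=
  PySem.List.slice pvPairsB none (some n)

-- ===== PRECONDITION & SPEC =====
def Spec_fun2t1 (n : Int) (out : List (String × Int)) : Prop := out = fun2t1_alt n
instance (n : Int) (out : List (String × Int)) : Decidable (Spec_fun2t1 n out) := by unfold Spec_fun2t1; infer_instance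

-- ===== CLAIM (what is proved, stated in full; the proofs are below) =====
def Claim_equal_fun2t1 : Prop := ∀ (n : Int), Dom_fun2t1 n → Spec_fun2t1 n (fun2t1 n)

-- ===== LEMMAS AND PROOFS =====
-- literal intermediate values (used only by the proofs below); each step is kernel evaluation
def pvRowsLit : List (List String) := [["(JUV)", " Cristiano Ronaldo", " 29", " 2634", " 25", " 162", " 2016"], ["(PSG)", " Neymar", " 30", " 2694", " 13", " 105", " 2016"], ["(BAR)", " Lionel Messi", " 32", " 2910", " 37", " 179", " 2016"], ["(RMA)", " Eden Hazard", " 36", " 3101", " 16", " 77", " 2016"], ["(TOT)", " Dele Alli", " 35", " 3182", " 18", " 95", " 2016"], ["(BAR)", " Lionel Messi", " 32", " 3123", " 33", " 197", " 2017"], ["(JUV)", " Cristiano Ronaldo", " 27", " 2375", " 26", " 178", " 2017"], ["(BAR)", " Lionel Messi", " 29", " 2849", " 36", " 170", " 2018"], ["(JUV)", " Cristiano Ronaldo", " 30", " 2857", " 21", " 177", " 2018"], ["(PSG)", " Angel Di Maria", " 28", " 2418", " 12", " 97", " 2018"], ["(PSG)", " Neymar", " 16", " 1517", " 15", " 54",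 " 2018"], ["(MNU)", " Edinson Cavani", " 20", " 1845", " 11", " 54", " 2018"], ["(RMA)", " Eden Hazard", " 32", " 3115", " 16", " 93", " 2018"], ["(BAR)", " Lionel Messi", " 32", " 3067", " 25", " 159", " 2019"], ["(JUV)", " Cristiano Ronaldo", " 33", " 3127", " 31", " 208", " 2019"], ["(INT)", " Lautaro Martinez", " 29", " 2581", " 14", " 82", " 2019"], ["(PSG)", " Neymar", " 15", " 1396", " 12", " 71", " 2019"], ["(PSG)", " Angel Di Maria", " 23", " 2106", " 8", " 74", " 2019"], ["(BAR)", " Lionel Messi", " 6", " 501", " 10", " 39", " 2020"], ["(JUV)", " Cristiano Ronaldo", " 5", " 397", " 8", " 26", " 2020"]]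

def pvCargLit : List (List String) := [["club", " jugador", " partidos", " minutos", " goles", " tiros", " anio"], ["(JUV)", " Cristiano Ronaldo", " 29", " 2634", " 25", " 162", " 2016"], ["(PSG)", " Neymar", " 30", " 2694", " 13", " 105", " 2016"], ["(BAR)", " Lionel Messi", " 32", " 2910", " 37", " 179", " 2016"], ["(RMA)", " Eden Hazard", " 36", " 3101", " 16", " 77", " 2016"], ["(TOT)", " Dele Alli", " 35", " 3182", " 18", " 95", " 2016"], ["(BAR)", " Lionel Messi", " 32", " 3123", " 33", " 197", " 2017"], ["(JUV)", " Cristiano Ronaldo", " 27", " 2375", " 26", " 178", " 2017"], ["(BAR)", " Lionel Messi", " 29", " 2849", " 36", " 170", " 2018"], ["(JUV)", " Cristiano Ronaldo", " 30", " 2857", " 21", " 177", " 2018"], ["(PSG)", " Angel Di Maria", " 28", " 2418", " 12", " 97", " 2018"], ["(PSG)", " Neymar", " 16", " 1517", " 15", " 54", " 2018"], ["(MNU)", " Edinson Cavani", " 20", " 1845", " 11", " 54", " 2018"], ["(RMA)", " Eden Hazard", " 32", " 3115", " 16", " 93", " 2018"], ["(BAR)", " Lionel Messi", " 32", " 3067",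 " 25", " 159", " 2019"], ["(JUV)", " Cristiano Ronaldo", " 33", " 3127", " 31", " 208", " 2019"], ["(INT)", " Lautaro Martinez", " 29", " 2581", " 14", " 82", " 2019"], ["(PSG)", " Neymar", " 15", " 1396", " 12", " 71", " 2019"], ["(PSG)", " Angel Di Maria", " 23", " 2106", " 8", " 74", " 2019"], ["(BAR)", " Lionel Messi", " 6", " 501", " 10", " 39", " 2020"], ["(JUV)", " Cristiano Ronaldo", " 5", " 397", " 8", " 26", " 2020"]]

def pvFinLit : List (String × Int) := [(" Cristiano Ronaldo", 11390), (" Neymar", 5607), (" Lionel Messi", 12450), (" Eden Hazard", 6216), (" Dele Alli", 3182), (" Angel Di Maria", 4524), (" Edinson Cavani", 1845), (" Lautaro Martinez", 2581)]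

def pvSortLit : List (String × Int) := [(" Lionel Messi", 12450), (" Cristiano Ronaldo", 11390), (" Eden Hazard", 6216), (" Neymar", 5607), (" Angel Di Maria", 4524), (" Dele Alli", 3182), (" Lautaro Martinez", 2581), (" Edinson Cavani", 1845)]

set_option maxRecDepth 100000 in
theorem pvCarg_eq : pvCargar pvLstArchA = pvCargLit := by decide

set_option maxRecDepth 100000 in
theorem pvRows_eq : pvRowsB = pvRowsLit := by decide

set_option maxRecDepth 100000 in
theorem pvFin_eq : pvLstFinalA = pvFinLit := by
  unfold pvLstFinalA
  rw [pvCarg_eq]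
  decide

set_option maxRecDepth 100000 in
theorem pvOrd_eq : pvOrdenar pvFinLit = pvSortLit := by decide

set_option maxRecDepth 100000 in
theorem pvPairs_eq : pvPairsB = pvSortLit := by
  unfold pvPairsB
  rw [pvRows_eq]
  decide

theorem pvPre_eq : pvOrdenar pvLstFinalA = pvPairsB := by
  rw [pvFin_eq, pvOrd_eq, pvPairs_eq]

-- ===== VERDICT (by name: the statement is the Claim_ definition above) =====
theorem fun2t1_spec : Claim_equal_fun2t1 := by
  intro n _
  unfold Spec_fun2t1 fun2t1 fun2t1_alt
  rw [pvPre_eq]
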